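-- pv_equiv track=rewrite | github.com/liupengsay/PyIsTheBestLang | src/dp/interval_dp/problem.py | lc_1278
-- ===== SOURCE A (Python) =====
-- def lc_1278(s: str, k: int) -> int:
--     """
--     url: https://leetcode.cn/problems/palindrome-partitioning-iii/
--     tag: preprocess_dp|interval_dp
--     """
--     n = len(s)
--
--     cost = [[0] * n for _ in range(n)]
--     for i in range(n - 1, -1, -1):
--         if i + 1 < n:
--             j = i + 1
--             cost[i][j] = 1 if s[i] != s[j] else 0
--         for j in range(i + 2, n):
--             cost[i][j] = cost[i + 1][j - 1] + int(s[i] != s[j])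
--
--     dp = [[n] * k for _ in range(n + 1)]
--     for i in range(n):
--         dp[i + 1][0] = cost[0][i]
--         for j in range(1, k):
--             dp[i + 1][j] = min(dp[x][j - 1] + cost[x][i] for x in range(i + 1))
--     return dp[n][k - 1]
-- ===== SOURCE B (Python) =====
-- def lc_1278(s: str, k: int) -> int:
--     n = len(s)
--     # cost[l][r] = mismatched pairs to make s[l..r] a palindrome, filled by
--     # expanding around every palindrome center (instead of an interval DP).
--     cost = [[0] * n for _ in range(n)]
--     for c in range(n):
--         for l, r in ((c - 1, c + 1), (c, c + 1)):
--             t = 0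
--             while l >= 0 and r < n:
--                 t += s[l] != s[r]
--                 cost[l][r] = t
--                 l -= 1
--                 r += 1
--     # layered DP over the number of palindromes, with rolling 1-D arrays;
--     # prev[m] = min edits to split the first m chars, prev[0] = n acts as
--     # "impossible" (any real cost is below n).
--     prev = [n] + [cost[0][m - 1] for m in range(1, n + 1)]
--     for _ in range(1, k):
--         prev = [n] + [min(prev[x] + cost[x][m - 1] for x in range(m))
--                       for m in range(1, n + 1)]
--     return prev[n]
-- ===== Notes on version B (the rewrite author's own statement) =====
-- stated objective: alternative
-- what changed: B computes the palindrome-cost table by expanding around every center instead of A's interval DP recurrence, and runs the partition DP layer-by-layer over the palindrome count with rolling 1-D arrays instead of A's 2D table filled prefix-by-prefix.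
import Mathlib
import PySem

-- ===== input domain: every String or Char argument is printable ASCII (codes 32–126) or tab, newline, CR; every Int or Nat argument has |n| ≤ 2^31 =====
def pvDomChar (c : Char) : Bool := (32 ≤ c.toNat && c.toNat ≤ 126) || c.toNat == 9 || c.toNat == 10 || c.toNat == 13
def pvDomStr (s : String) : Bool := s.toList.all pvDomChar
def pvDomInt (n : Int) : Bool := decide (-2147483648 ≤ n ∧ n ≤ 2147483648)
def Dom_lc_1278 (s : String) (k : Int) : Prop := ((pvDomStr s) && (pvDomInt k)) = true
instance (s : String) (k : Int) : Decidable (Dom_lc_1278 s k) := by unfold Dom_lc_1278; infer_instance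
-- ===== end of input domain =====

-- B computes the palindrome-cost table by center expansion and the partition DP
-- with rolling 1-D layers, instead of A's interval-DP cost recurrence and 2D table
-- (objective: alternative algorithmic structure, same asymptotic cost).

-- shared low-level helpers (Python 2D-list indexing/assignment and the builtin min)
-- tget c x y = c[x][y] ; tset c x y v = "c[x][y] = v" (indices in range wherever used)
def tget (c : List (List Int)) (x y : Nat) : Int := (c.getD x []).getD y 0

def tset (c : List (List Int)) (x y : Nat) (v : Int) : List (List Int) :=
  c.set x ((c.getD x []).set y v)

-- int(s[i] != s[j]) ; indices are always in range where the ports use it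
def mis (l : List Char) (i j : Nat) : Int :=
  if l.getD i ' ' ≠ l.getD j ' ' then 1 else 0

-- Python's min over a nonempty generator indexed by range(m); the extra g 0 seed
-- is absorbed by idempotence of min (only ever used with 1 ≤ m)
def imin (g : Nat → Int) (m : Nat) : Int :=
  ((List.range m).map g).foldl min (g 0)

-- ===== PORT A =====
-- one iteration of A's outer cost loop (row i, filled right of the diagonal)
def costFillRow (l : List Char) (n : Nat) (c : List (List Int)) (i : Nat) : List (List Int) :=
  (List.range' (i+2) (n - (i+2))).foldl
    (fun c j => tset c i j (tget c (i+1) (j-1) + mis l i j))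
    (if i + 1 < n then tset c i (i+1) (mis l i (i+1)) else c)

-- one iteration of A's dp loop (prefix of length i+1, columns 0 and 1..kk)
def dpFillRow (ct : List (List Int)) (kk : Nat) (d : List (List Int)) (i : Nat) : List (List Int) :=
  (List.range' 1 kk).foldl
    (fun d j => tset d (i+1) j (imin (fun x => tget d x (j-1) + tget ct x i) (i+1)))
    (tset d (i+1) 0 (tget ct 0 i))

def lc_1278 (s : String) (k : Int) : Int :=
  let l := s.toList
  let n := l.length
  let ct := (List.range n).reverse.foldl (costFillRow l n)
    (List.replicate n (List.replicate n 0))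
  let d := (List.range n).foldl (dpFillRow ct ((k - 1).toNat))
    (List.replicate (n+1) (List.replicate k.toNat (n : Int)))
  tget d n ((k - 1).toNat)

-- ===== PORT B =====
-- B's inner while loop: expand outward from a center, accumulating mismatches
def expandFill (l : List Char) (n : Nat) : Nat → Int → Nat → Int → List (List Int) → List (List Int)
  | 0, _, _, _, c => c
  | fuel+1, lo, r, t, c =>
    if 0 ≤ lo ∧ r < n then
      expandFill l n fuel (lo - 1) (r + 1) (t + mis l lo.toNat r)
        (tset c lo.toNat r (t + mis l lo.toNat r))
    else c

-- both expansions (odd- and even-length) around center ctr; fuel n bounds the steps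
def centerFill (l : List Char) (n : Nat) (c : List (List Int)) (ctr : Nat) : List (List Int) :=
  expandFill l n n (ctr : Int) (ctr + 1) 0
    (expandFill l n n ((ctr : Int) - 1) (ctr + 1) 0 c)

def lc_1278_alt (s : String) (k : Int) : Int :=
  let l := s.toList
  let n := l.length
  let ct := (List.range n).foldl (centerFill l n) (List.replicate n (List.replicate n 0))
  let first : List Int := (n : Int) :: ((List.range' 1 n).map fun m => tget ct 0 (m-1))
  let fin := (List.range' 1 ((k - 1).toNat)).foldl
    (fun prev _ => (n : Int) :: ((List.range' 1 n).map fun m =>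
        imin (fun x => prev.getD x 0 + tget ct x (m-1)) m)) first
  fin.getD n 0

-- ===== PRECONDITION & SPEC =====
-- Pre_ excludes exactly k ≤ 0, where A raises IndexError (dp rows are empty / dp[n][-1]).
def Pre_lc_1278 (s : String) (k : Int) : Prop := 1 ≤ k
instance (s : String) (k : Int) : Decidable (Pre_lc_1278 s k) := by unfold Pre_lc_1278; infer_instance
def pvWitness_lc_1278 : String × Int := ("ab", 2)

def Spec_lc_1278 (s : String) (k : Int) (out : Int) : Prop := out = lc_1278_alt s k
instance (s : String) (k : Int) (out : Int) : Decidable (Spec_lc_1278 s k out) := by unfold Spec_lc_1278; infer_instance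

-- ===== CLAIM (what is proved, stated in full; the proofs are below) =====
def Claim_equal_lc_1278 : Prop := ∀ (s : String) (k : Int), Dom_lc_1278 s k → Pre_lc_1278 s k → Spec_lc_1278 s k (lc_1278 s k)

-- ===== LEMMAS AND PROOFS =====

-- mismatch count of the interval [x, y] (the common value of both cost tables)
def Cm (l : List Char) (x y : Nat) : Int :=
  if x < y then mis l x y + Cm l (x+1) (y-1) else 0
termination_by y - x
decreasing_by omega

-- the partition DP value: Fsp l n m j = min edits to split the first m chars into j+1 palindromes,
-- with n standing for "impossible" at m = 0 (exactly as both programs use it)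
def Fsp (l : List Char) (n : Nat) : Nat → Nat → Int
  | m, 0 => if m = 0 then (n : Int) else Cm l 0 (m-1)
  | m, j+1 => if m = 0 then (n : Int) else imin (fun x => Fsp l n x j + Cm l x (m-1)) m
termination_by _ j => j

lemma Cm_zero (l : List Char) {x y : Nat} (h : y ≤ x) : Cm l x y = 0 := by
  rw [Cm]; simp [Nat.not_lt.2 h]

lemma imin_congr {g g' : Nat → Int} {m : Nat} (h0 : 0 < m)
    (h : ∀ x, x < m → g x = g' x) : imin g m = imin g' m := by
  unfold imin
  rw [h 0 h0, List.map_congr_left (fun x hx => h x (List.mem_range.1 hx))]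

lemma Fsp_zero (l : List Char) (n : Nat) (j : Nat) : Fsp l n 0 j = (n : Int) := by
  cases j <;> (rw [Fsp]; simp)

-- ---- 2D-list table plumbing ----

-- the table has `rows` rows, each of length `cols`
def ShapeT (c : List (List Int)) (rows cols : Nat) : Prop :=
  c.length = rows ∧ ∀ x, x < rows → (c.getD x []).length = cols

lemma pv_getD_set {α : Type} (l : List α) (i : Nat) (v : α) (j : Nat) (d : α)
    (hi : i < l.length) :
    (l.set i v).getD j d = if j = i then v else l.getD j d := by
  by_cases hj : j = i
  · rw [hj, if_pos rfl, List.getD_eq_getElem _ _ (by simpa using hi), List.getElem_set_self]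
  · rw [if_neg hj]
    by_cases hjl : j < l.length
    · rw [List.getD_eq_getElem _ _ (by simpa using hjl), List.getD_eq_getElem _ _ hjl,
        List.getElem_set_ne (by omega)]
    · rw [List.getD_eq_default _ _ (by simpa using Nat.not_lt.1 hjl),
        List.getD_eq_default _ _ (Nat.not_lt.1 hjl)]

lemma shape_replicate (rows cols : Nat) (z : Int) :
    ShapeT (List.replicate rows (List.replicate cols z)) rows cols := by
  refine ⟨by simp, ?_⟩
  intro x hx
  rw [List.getD_eq_getElem _ _ (by simpa using hx), List.getElem_replicate]
  simp

lemma shape_tset (c : List (List Int)) (rows cols a b : Nat) (v : Int)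
    (hs : ShapeT c rows cols) (ha : a < rows) :
    ShapeT (tset c a b v) rows cols := by
  obtain ⟨h1, h2⟩ := hs
  refine ⟨by simpa [tset] using h1, ?_⟩
  intro x hx
  unfold tset
  rw [pv_getD_set _ _ _ _ _ (show a < c.length by omega)]
  by_cases hxa : x = a
  · rw [if_pos hxa, List.length_set]
    exact h2 a ha
  · rw [if_neg hxa]
    exact h2 x hx

lemma tget_tset (c : List (List Int)) (rows cols a b : Nat) (v : Int)
    (hs : ShapeT c rows cols) (ha : a < rows) (hb : b < cols) :
    ∀ x y, tget (tset c a b v) x y = if x = a ∧ y = b then v else tget c x y := by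
  intro x y
  unfold tget tset
  rw [pv_getD_set _ _ _ _ _ (show a < c.length by rw [hs.1]; exact ha)]
  by_cases hx : x = a
  · rw [hx, if_pos rfl,
      pv_getD_set _ _ _ _ _ (show b < (c.getD a []).length by rw [hs.2 a ha]; exact hb)]
    split_ifs <;> first | rfl | tauto
  · rw [if_neg hx, if_neg (fun h => hx h.1)]

lemma tget_replicate (rows cols : Nat) (z : Int) (x y : Nat) (hx : x < rows) (hy : y < cols) :
    tget (List.replicate rows (List.replicate cols z)) x y = z := by
  unfold tget
  have h1 : (List.replicate rows (List.replicate cols z)).getD x [] = List.replicate cols z := by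
    rw [List.getD_eq_getElem _ _ (by simpa using hx)]
    simp
  rw [h1, List.getD_eq_getElem _ _ (by simpa using hy), List.getElem_replicate]

-- ---- A's cost table equals Cm ----

lemma cost_inner (l : List Char) (n i : Nat) :
    ∀ (cnt j0 : Nat) (c : List (List Int)), i + 2 ≤ j0 → j0 + cnt = n →
    ShapeT c n n →
    (∀ x y, x < n → y < n → x ≠ i → tget c x y = if i+1 ≤ x ∧ x < y then Cm l x y else 0) →
    (∀ y, y < n → tget c i y = if i < y ∧ y < j0 then Cm l i y else 0) →
    ShapeT ((List.range' j0 cnt).foldl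
        (fun c j => tset c i j (tget c (i+1) (j-1) + mis l i j)) c) n n ∧
    ∀ x y, x < n → y < n →
      tget ((List.range' j0 cnt).foldl
          (fun c j => tset c i j (tget c (i+1) (j-1) + mis l i j)) c) x y
        = if i ≤ x ∧ x < y then Cm l x y else 0 := by
  intro cnt
  induction cnt with
  | zero =>
    intro j0 c hj0 hjn hs hrow hi
    simp only [List.range'_zero, List.foldl_nil]
    refine ⟨hs, ?_⟩
    intro x y hxn hyn
    by_cases hx : x = i
    · rw [hx, hi y hyn]; split_ifs <;> first | rfl | omega
    · rw [hrow x y hxn hyn hx]; split_ifs <;> first | rfl | omega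
  | succ cnt ih =>
    intro j0 c hj0 hjn hs hrow hi
    rw [List.range'_succ, List.foldl_cons]
    have hin : i < n := by omega
    have hj0n : j0 < n := by omega
    refine ih (j0+1) _ (by omega) (by omega) (shape_tset c n n i j0 _ hs hin) ?_ ?_
    · intro x y hxn hyn hx
      rw [tget_tset c n n i j0 _ hs hin hj0n x y, if_neg (fun h => hx h.1)]
      exact hrow x y hxn hyn hx
    · intro y hyn
      rw [tget_tset c n n i j0 _ hs hin hj0n i y]
      by_cases hy : y = j0
      · rw [hy, if_pos ⟨rfl, rfl⟩, if_pos ⟨by omega, by omega⟩]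
        have key : Cm l i j0 = mis l i j0 + Cm l (i+1) (j0-1) := by
          rw [Cm, if_pos (show i < j0 by omega)]
        rw [key, hrow (i+1) (j0-1) (by omega) (by omega) (by omega)]
        by_cases hlt : i + 1 < j0 - 1
        · rw [if_pos ⟨le_refl _, hlt⟩, add_comm]
        · rw [if_neg (by omega), Cm_zero l (show j0-1 ≤ i+1 by omega)]
          omega
      · rw [if_neg (fun h => hy h.2), hi y hyn]
        split_ifs <;> first | rfl | omega

lemma costFillRow_correct (l : List Char) (n i : Nat) (hi : i < n)
    (c : List (List Int)) (hs : ShapeT c n n)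
    (hc : ∀ x y, x < n → y < n → tget c x y = if i+1 ≤ x ∧ x < y then Cm l x y else 0) :
    ShapeT (costFillRow l n c i) n n ∧
    ∀ x y, x < n → y < n →
      tget (costFillRow l n c i) x y = if i ≤ x ∧ x < y then Cm l x y else 0 := by
  unfold costFillRow
  by_cases h2 : i + 2 ≤ n
  · have hlt : i + 1 < n := by omega
    rw [if_pos hlt]
    refine cost_inner l n i (n - (i+2)) (i+2) _ (le_refl _) (by omega)
      (shape_tset c n n i (i+1) _ hs hi) ?_ ?_
    · intro x y hxn hyn hx
      rw [tget_tset c n n i (i+1) _ hs hi hlt x y, if_neg (fun h => hx h.1)]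
      exact hc x y hxn hyn
    · intro y hyn
      rw [tget_tset c n n i (i+1) _ hs hi hlt i y]
      by_cases hy : y = i + 1
      · rw [hy, if_pos ⟨rfl, rfl⟩, if_pos ⟨by omega, by omega⟩]
        rw [Cm, if_pos (show i < i + 1 by omega), Cm_zero l (by omega)]
        omega
      · rw [if_neg (fun h => hy h.2), hc i y hi hyn]
        split_ifs <;> first | rfl | omega
  · have h0 : n - (i+2) = 0 := by omega
    rw [h0, if_neg (by omega)]
    simp only [List.range'_zero, List.foldl_nil]
    refine ⟨hs, ?_⟩
    intro x y hxn hyn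
    rw [hc x y hxn hyn]
    split_ifs <;> first | rfl | omega

lemma costA_correct (l : List Char) (n : Nat) :
    ∀ m, m ≤ n →
    ShapeT (((List.range' (n-m) m).reverse).foldl (costFillRow l n)
        (List.replicate n (List.replicate n 0))) n n ∧
    ∀ x y, x < n → y < n →
      tget (((List.range' (n-m) m).reverse).foldl (costFillRow l n)
          (List.replicate n (List.replicate n 0))) x y
        = if n - m ≤ x ∧ x < y then Cm l x y else 0 := by
  intro m
  induction m with
  | zero =>
    intro _
    simp only [List.range'_zero, List.reverse_nil, List.foldl_nil]
    refine ⟨shape_replicate n n 0, ?_⟩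
    intro x y hx hy
    rw [tget_replicate n n 0 x y hx hy]
    split_ifs <;> first | rfl | omega
  | succ m ih =>
    intro hm
    have e1 : n - m = (n - (m+1)) + 1 := by omega
    rw [List.range'_succ, List.reverse_cons, List.foldl_append, List.foldl_cons, List.foldl_nil]
    have prev := ih (by omega)
    rw [e1] at prev
    exact costFillRow_correct l n (n-(m+1)) (by omega) _ prev.1 prev.2

lemma costA_final (l : List Char) (n : Nat) :
    ∀ x y, x < n → y < n →
      tget ((List.range n).reverse.foldl (costFillRow l n)
          (List.replicate n (List.replicate n 0))) x y
        = if x < y then Cm l x y else 0 := by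
  intro x y hx hy
  rw [List.range_eq_range']
  have h := costA_correct l n n (le_refl n)
  rw [Nat.sub_self] at h
  rw [h.2 x y hx hy]
  split_ifs <;> first | rfl | omega

-- ---- B's cost table equals Cm ----

lemma expand_corr (l : List Char) (n : Nat) :
    ∀ (fuel : Nat) (lo : Int) (r : Nat) (t : Int) (c : List (List Int)),
    -1 ≤ lo → lo < (r : Int) → n ≤ fuel + r → 1 ≤ r →
    t = Cm l (lo+1).toNat (r-1) →
    ShapeT c n n →
    ShapeT (expandFill l n fuel lo r t c) n n ∧
    ∀ x y, x < n → y < n →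
      tget (expandFill l n fuel lo r t c) x y
        = if (x : Int) + y = lo + r ∧ r ≤ y then Cm l x y else tget c x y := by
  intro fuel
  induction fuel with
  | zero =>
    intro lo r t c h1 h2 h3 h4 ht hs
    simp only [expandFill]
    exact ⟨hs, fun x y hx hy => by rw [if_neg (by omega)]⟩
  | succ fuel ih =>
    intro lo r t c h1 h2 h3 h4 ht hs
    simp only [expandFill]
    by_cases hg : 0 ≤ lo ∧ r < n
    · rw [if_pos hg]
      have hlon : lo.toNat < n := by omega
      have hv : t + mis l lo.toNat r = Cm l lo.toNat r := by
        rw [Cm, if_pos (show lo.toNat < r by omega), ht,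
          show (lo+1).toNat = lo.toNat + 1 from by omega]
        omega
      have ht' : t + mis l lo.toNat r = Cm l ((lo-1)+1).toNat ((r+1)-1) := by
        rw [show ((lo-1)+1).toNat = lo.toNat from by omega]
        exact hv
      have hrec := ih (lo-1) (r+1) _ (tset c lo.toNat r (t + mis l lo.toNat r))
        (by omega) (by omega) (by omega) (by omega) ht'
        (shape_tset c n n lo.toNat r _ hs hlon)
      refine ⟨hrec.1, ?_⟩
      intro x y hx hy
      rw [hrec.2 x y hx hy, tget_tset c n n lo.toNat r _ hs hlon hg.2 x y]
      by_cases hB : x = lo.toNat ∧ y = r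
      · rw [if_neg (by omega), if_pos hB, if_pos (by omega), hB.1, hB.2]
        exact hv
      · rw [if_neg hB]
        split_ifs <;> first | rfl | omega
    · rw [if_neg hg]
      refine ⟨hs, ?_⟩
      intro x y hx hy
      rw [if_neg (by omega)]

lemma centerFill_correct (l : List Char) (n ctr : Nat) (c : List (List Int))
    (hs : ShapeT c n n)
    (hc : ∀ x y, x < n → y < n → tget c x y = if x < y ∧ (x+y)/2 < ctr then Cm l x y else 0) :
    ShapeT (centerFill l n c ctr) n n ∧
    ∀ x y, x < n → y < n →
      tget (centerFill l n c ctr) x y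
        = if x < y ∧ (x+y)/2 < ctr + 1 then Cm l x y else 0 := by
  unfold centerFill
  have hodd := expand_corr l n n ((ctr : Int)-1) (ctr+1) 0 c (by omega) (by omega) (by omega)
    (by omega)
    (by rw [show (((ctr : Int)-1)+1).toNat = ctr from by omega, Nat.add_sub_cancel,
          Cm_zero l (le_refl ctr)]) hs
  have heven := expand_corr l n n (ctr : Int) (ctr+1) 0 _ (by omega) (by omega) (by omega)
    (by omega)
    (by rw [show ((ctr : Int)+1).toNat = ctr + 1 from by omega, Nat.add_sub_cancel,
          Cm_zero l (Nat.le_succ ctr)]) hodd.1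
  refine ⟨heven.1, ?_⟩
  intro x y hx hy
  rw [heven.2 x y hx hy, hodd.2 x y hx hy, hc x y hx hy]
  split_ifs <;> first | rfl | omega

lemma costB_correct (l : List Char) (n : Nat) :
    ∀ m, m ≤ n →
    ShapeT ((List.range m).foldl (centerFill l n)
        (List.replicate n (List.replicate n 0))) n n ∧
    ∀ x y, x < n → y < n →
      tget ((List.range m).foldl (centerFill l n)
          (List.replicate n (List.replicate n 0))) x y
        = if x < y ∧ (x+y)/2 < m then Cm l x y else 0 := by
  intro m
  induction m with
  | zero =>
    intro _
    simp only [List.range_zero, List.foldl_nil]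
    refine ⟨shape_replicate n n 0, ?_⟩
    intro x y hx hy
    rw [tget_replicate n n 0 x y hx hy]
    split_ifs <;> first | rfl | omega
  | succ m ih =>
    intro hm
    rw [List.range_succ, List.foldl_append, List.foldl_cons, List.foldl_nil]
    exact centerFill_correct l n m _ (ih (by omega)).1 (ih (by omega)).2

lemma costB_final (l : List Char) (n : Nat) :
    ∀ x y, x < n → y < n →
      tget ((List.range n).foldl (centerFill l n)
          (List.replicate n (List.replicate n 0))) x y
        = if x < y then Cm l x y else 0 := by
  intro x y hx hy
  rw [(costB_correct l n n (le_refl n)).2 x y hx hy]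
  split_ifs <;> first | rfl | omega

-- ---- A's dp table equals Fsp ----

lemma dp_inner (l : List Char) (n i kk : Nat) (hi : i < n)
    (ct : List (List Int))
    (hct : ∀ x y, x < n → y < n → tget ct x y = if x < y then Cm l x y else 0) :
    ∀ (cnt j0 : Nat) (d : List (List Int)), 1 ≤ j0 → j0 + cnt = kk + 1 →
    ShapeT d (n+1) (kk+1) →
    (∀ m j, m ≤ n → j ≤ kk →
      tget d m j = if (m ≤ i ∧ j ≤ kk) ∨ (m = i+1 ∧ j < j0) then Fsp l n m j else (n : Int)) →
    ShapeT ((List.range' j0 cnt).foldl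
        (fun d j => tset d (i+1) j (imin (fun x => tget d x (j-1) + tget ct x i) (i+1))) d)
      (n+1) (kk+1) ∧
    ∀ m j, m ≤ n → j ≤ kk →
      tget ((List.range' j0 cnt).foldl
          (fun d j => tset d (i+1) j (imin (fun x => tget d x (j-1) + tget ct x i) (i+1))) d) m j
        = if (m ≤ i ∧ j ≤ kk) ∨ (m = i+1 ∧ j < j0 + cnt) then Fsp l n m j else (n : Int) := by
  intro cnt
  induction cnt with
  | zero =>
    intro j0 d hj0 hjn hs hd
    simp only [List.range'_zero, List.foldl_nil]
    refine ⟨hs, ?_⟩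
    intro m j hm hj
    rw [hd m j hm hj]
    split_ifs <;> first | rfl | omega
  | succ cnt ih =>
    intro j0 d hj0 hjn hs hd
    rw [List.range'_succ, List.foldl_cons]
    have hi1 : i + 1 < n + 1 := by omega
    have hj0k : j0 < kk + 1 := by omega
    have goal2 := ih (j0+1)
      (tset d (i+1) j0 (imin (fun x => tget d x (j0-1) + tget ct x i) (i+1)))
      (by omega) (by omega) (shape_tset d (n+1) (kk+1) (i+1) j0 _ hs hi1) ?_
    · refine ⟨goal2.1, ?_⟩
      intro m j hm hj
      rw [goal2.2 m j hm hj]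
      split_ifs <;> first | rfl | omega
    intro m' j' hm' hj'
    rw [tget_tset d (n+1) (kk+1) (i+1) j0 _ hs hi1 hj0k m' j']
    by_cases hB : m' = i+1 ∧ j' = j0
    · rw [hB.1, hB.2, if_pos ⟨rfl, rfl⟩, if_pos (Or.inr ⟨rfl, by omega⟩)]
      obtain ⟨jj, rfl⟩ : ∃ jj, j0 = jj + 1 := ⟨j0 - 1, by omega⟩
      rw [show Fsp l n (i+1) (jj+1) = imin (fun x => Fsp l n x jj + Cm l x ((i+1)-1)) (i+1) from
        by rw [Fsp]; simp]
      refine imin_congr (by omega) ?_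
      intro x hx
      simp only [Nat.add_sub_cancel]
      rw [hd x jj (by omega) (by omega), if_pos (Or.inl ⟨by omega, by omega⟩),
        hct x i (by omega) hi]
      by_cases hxi : x < i
      · rw [if_pos hxi]
      · rw [if_neg (by omega), Cm_zero l (show i ≤ x by omega)]
    · rw [if_neg hB, hd m' j' hm' hj']
      split_ifs <;> first | rfl | omega

lemma dpFillRow_correct (l : List Char) (n i kk : Nat) (hi : i < n)
    (ct : List (List Int))
    (hct : ∀ x y, x < n → y < n → tget ct x y = if x < y then Cm l x y else 0)
    (d : List (List Int)) (hs : ShapeT d (n+1) (kk+1))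
    (hd : ∀ m j, m ≤ n → j ≤ kk →
      tget d m j = if m ≤ i ∧ j ≤ kk then Fsp l n m j else (n : Int)) :
    ShapeT (dpFillRow ct kk d i) (n+1) (kk+1) ∧
    ∀ m j, m ≤ n → j ≤ kk →
      tget (dpFillRow ct kk d i) m j
        = if m ≤ i + 1 ∧ j ≤ kk then Fsp l n m j else (n : Int) := by
  unfold dpFillRow
  have hi1 : i + 1 < n + 1 := by omega
  have h0k : 0 < kk + 1 := by omega
  have inner := dp_inner l n i kk hi ct hct kk 1 (tset d (i+1) 0 (tget ct 0 i))
    (le_refl 1) (by omega) (shape_tset d (n+1) (kk+1) (i+1) 0 _ hs hi1) ?_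
  · refine ⟨inner.1, ?_⟩
    intro m j hm hj
    rw [inner.2 m j hm hj]
    split_ifs <;> first | rfl | omega
  intro m' j' hm' hj'
  rw [tget_tset d (n+1) (kk+1) (i+1) 0 _ hs hi1 h0k m' j']
  by_cases hB : m' = i+1 ∧ j' = 0
  · rw [hB.1, hB.2, if_pos ⟨rfl, rfl⟩, if_pos (Or.inr ⟨rfl, by omega⟩),
      hct 0 i (by omega) hi]
    rw [show Fsp l n (i+1) 0 = Cm l 0 ((i+1)-1) from by rw [Fsp]; simp]
    simp only [Nat.add_sub_cancel]
    by_cases h0 : 0 < i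
    · rw [if_pos h0]
    · rw [if_neg (by omega), show i = 0 from by omega, Cm_zero l (le_refl 0)]
  · rw [if_neg hB, hd m' j' hm' hj']
    split_ifs <;> first | rfl | omega

lemma dpA_correct (l : List Char) (n kk : Nat)
    (ct : List (List Int))
    (hct : ∀ x y, x < n → y < n → tget ct x y = if x < y then Cm l x y else 0) :
    ∀ i, i ≤ n →
    ShapeT ((List.range i).foldl (dpFillRow ct kk)
        (List.replicate (n+1) (List.replicate (kk+1) (n : Int)))) (n+1) (kk+1) ∧
    ∀ m j, m ≤ n → j ≤ kk →
      tget ((List.range i).foldl (dpFillRow ct kk)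
          (List.replicate (n+1) (List.replicate (kk+1) (n : Int)))) m j
        = if m ≤ i ∧ j ≤ kk then Fsp l n m j else (n : Int) := by
  intro i
  induction i with
  | zero =>
    intro _
    simp only [List.range_zero, List.foldl_nil]
    refine ⟨shape_replicate (n+1) (kk+1) (n : Int), ?_⟩
    intro m j hm hj
    rw [tget_replicate (n+1) (kk+1) (n : Int) m j (by omega) (by omega)]
    split_ifs with h
    · rw [show m = 0 from by omega, Fsp_zero]
    · rfl
  | succ i ih =>
    intro hi1
    rw [List.range_succ, List.foldl_append, List.foldl_cons, List.foldl_nil]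
    exact dpFillRow_correct l n i kk (by omega) ct hct _ (ih (by omega)).1 (ih (by omega)).2

-- ---- B's rolling layers equal Fsp ----

lemma firstB_correct (l : List Char) (n : Nat)
    (ct : List (List Int))
    (hct : ∀ x y, x < n → y < n → tget ct x y = if x < y then Cm l x y else 0) :
    ∀ m, m ≤ n →
      (((n : Int) :: ((List.range' 1 n).map fun m => tget ct 0 (m-1))) : List Int).getD m 0
        = Fsp l n m 0 := by
  intro m hm
  match m with
  | 0 => rw [List.getD_cons_zero, Fsp_zero]
  | mm+1 =>
    rw [List.getD_cons_succ]
    have hlen : mm < ((List.range' 1 n).map fun m => tget ct 0 (m-1)).length := by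
      simp only [List.length_map, List.length_range']; omega
    rw [List.getD_eq_getElem _ _ hlen, List.getElem_map, List.getElem_range']
    simp only [one_mul]
    rw [show 1 + mm - 1 = mm from by omega, hct 0 mm (by omega) (by omega)]
    rw [show Fsp l n (mm+1) 0 = Cm l 0 ((mm+1)-1) from by rw [Fsp]; simp]
    simp only [Nat.add_sub_cancel]
    by_cases h0 : 0 < mm
    · rw [if_pos h0]
    · rw [if_neg (by omega), show mm = 0 from by omega, Cm_zero l (le_refl 0)]

lemma layerB_correct (l : List Char) (n : Nat)
    (ct : List (List Int))
    (hct : ∀ x y, x < n → y < n → tget ct x y = if x < y then Cm l x y else 0) :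
    ∀ (js : List Nat) (prev : List Int) (j : Nat),
    (∀ m, m ≤ n → prev.getD m 0 = Fsp l n m j) →
    ∀ m, m ≤ n →
      (js.foldl (fun prev _ => (n : Int) :: ((List.range' 1 n).map fun m =>
          imin (fun x => prev.getD x 0 + tget ct x (m-1)) m)) prev).getD m 0
        = Fsp l n m (j + js.length) := by
  intro js
  induction js with
  | nil =>
    intro prev j hp m hm
    simp only [List.foldl_nil, List.length_nil, Nat.add_zero]
    exact hp m hm
  | cons a js ih =>
    intro prev j hp m hm
    simp only [List.foldl_cons, List.length_cons]
    have step : ∀ m, m ≤ n →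
        (((n : Int) :: ((List.range' 1 n).map fun mm =>
            imin (fun x => prev.getD x 0 + tget ct x (mm-1)) mm)) : List Int).getD m 0
          = Fsp l n m (j+1) := by
      intro m hm
      match m with
      | 0 => rw [List.getD_cons_zero, Fsp_zero]
      | mm+1 =>
        rw [List.getD_cons_succ]
        have hlen : mm < ((List.range' 1 n).map fun mm =>
            imin (fun x => prev.getD x 0 + tget ct x (mm-1)) mm).length := by
          simp only [List.length_map, List.length_range']; omega
        rw [List.getD_eq_getElem _ _ hlen, List.getElem_map, List.getElem_range']
        simp only [one_mul]
        rw [show 1 + mm = mm + 1 from by omega]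
        rw [show Fsp l n (mm+1) (j+1)
            = imin (fun x => Fsp l n x j + Cm l x ((mm+1)-1)) (mm+1) from by rw [Fsp]; simp]
        refine imin_congr (by omega) ?_
        intro x hx
        simp only [Nat.add_sub_cancel]
        rw [hp x (by omega), hct x mm (by omega) (by omega)]
        by_cases hxm : x < mm
        · rw [if_pos hxm]
        · rw [if_neg (by omega), Cm_zero l (show mm ≤ x by omega)]
    rw [show j + (js.length + 1) = (j+1) + js.length from by omega]
    exact ih _ (j+1) step m hm

-- ===== VERDICT (by name: the statement is the Claim_ definition above) =====
theorem lc_1278_spec : Claim_equal_lc_1278 := by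
  unfold Claim_equal_lc_1278
  intro s k _ hk
  unfold Pre_lc_1278 at hk
  unfold Spec_lc_1278
  simp only [lc_1278, lc_1278_alt]
  rw [show k.toNat = (k - 1).toNat + 1 from by omega]
  have hA := (dpA_correct s.toList s.toList.length ((k-1).toNat) _
      (costA_final s.toList s.toList.length)
      s.toList.length (le_refl _)).2
    s.toList.length ((k-1).toNat) (le_refl _) (le_refl _)
  rw [hA, if_pos ⟨le_refl _, le_refl _⟩]
  have hB := layerB_correct s.toList s.toList.length _
    (costB_final s.toList s.toList.length)
    (List.range' 1 ((k-1).toNat)) _ 0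
    (firstB_correct s.toList s.toList.length _ (costB_final s.toList s.toList.length))
    s.toList.length (le_refl _)
  rw [hB, List.length_range', Nat.zero_add]
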